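-- pv_equiv track=rewrite | github.com/atharva-malik/Random-Projects | Python/tripplanner.py | humaniser
-- ===== SOURCE A (Python) =====
-- def humaniser(inp):
--     output = ""
--     for i in inp:
--         # elif i not in ["1", "2", "3", "4", "5", "6", "7", "8", "9", "0"]:
--         #     output += i + " "
--         if i in ["A", "B", "C", "D", "E", "F", "G", "H", "I", "J", "K", "L", "M", "N", "O", "P", "Q", "R", "S", "T", "U", "V", "W", "X", "Y", "Z"]:
--             output += " " + i
--         elif i == ",":
--             pass
--         else:
--             output += i
--     return output
-- ===== SOURCE B (Python) =====
-- import re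
--
-- def humaniser(inp):
--     return re.sub(r'([A-Z])', r' \1', inp.replace(',', ''))
-- ===== Notes on version B (the rewrite author's own statement) =====
-- stated objective: idiomatic
-- what changed: Replaces the per-character branch loop building a string by repeated concatenation with two pattern substitutions: delete all commas, then one regex substitution inserting a space before each ASCII uppercase letter.
import Mathlib
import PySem

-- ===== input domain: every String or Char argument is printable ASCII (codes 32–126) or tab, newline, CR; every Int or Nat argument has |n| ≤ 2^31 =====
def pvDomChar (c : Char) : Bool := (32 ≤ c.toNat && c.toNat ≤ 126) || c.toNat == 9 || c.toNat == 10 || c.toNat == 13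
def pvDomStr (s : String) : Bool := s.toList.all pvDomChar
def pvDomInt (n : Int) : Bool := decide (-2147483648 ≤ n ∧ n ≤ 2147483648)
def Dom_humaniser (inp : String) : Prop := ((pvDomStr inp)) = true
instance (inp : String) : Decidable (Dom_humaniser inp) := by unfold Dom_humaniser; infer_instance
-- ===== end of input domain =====

-- B replaces A's per-character branch loop by two substitution passes: delete commas, then insert a space before every ASCII uppercase letter (regex [A-Z] = codes 65..90).

-- ===== PORT A =====
-- the literal uppercase list of A
def upperList : List Char :=
  ['A','B','C','D','E','F','G','H','I','J','K','L','M','N','O','P','Q','R','S','T','U','V','W','X','Y','Z']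

def humaniser (inp : String) : String :=
  inp.toList.foldl (fun output i =>
    if i ∈ upperList then output ++ String.ofList [' ', i]
    else if i = ',' then output
    else output ++ String.ofList [i]) ""

-- ===== PORT B =====
-- regex substitution ' \1' for the match group ([A-Z]); exact on ASCII since [A-Z] is codes 65..90
def subUpper (c : Char) : List Char :=
  if 65 ≤ c.toNat ∧ c.toNat ≤ 90 then [' ', c] else [c]

def humaniser_alt (inp : String) : String :=
  String.ofList (((inp.toList.filter (fun c => c ≠ ',')).flatMap subUpper))

-- ===== PRECONDITION & SPEC =====
def Spec_humaniser (inp : String) (out : String) : Prop := out = humaniser_alt inp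
instance (inp : String) (out : String) : Decidable (Spec_humaniser inp out) := by unfold Spec_humaniser; infer_instance

-- ===== CLAIM (what is proved, stated in full; the proofs are below) =====
def Claim_equal_humaniser : Prop := ∀ (inp : String), Dom_humaniser inp → Spec_humaniser inp (humaniser inp)

-- ===== LEMMAS AND PROOFS =====

theorem mem_upperList_iff (c : Char) : c ∈ upperList ↔ (65 ≤ c.toNat ∧ c.toNat ≤ 90) := by
  constructor
  · intro h
    fin_cases h <;> decide
  · rintro ⟨h1, h2⟩
    have hc : c = Char.ofNat c.toNat := (Char.ofNat_toNat c).symm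
    interval_cases h : c.toNat <;> simp_all <;> decide

theorem foldl_emit (l : List Char) (acc : String) :
    l.foldl (fun output i =>
      if i ∈ upperList then output ++ String.ofList [' ', i]
      else if i = ',' then output
      else output ++ String.ofList [i]) acc
    = acc ++ String.ofList ((l.filter (fun c => c ≠ ',')).flatMap subUpper) := by
  induction l generalizing acc with
  | nil => simp
  | cons c l ih =>
    by_cases hc : c = ','
    · subst hc
      have hu : ¬ (',' ∈ upperList) := by decide
      simp only [List.foldl_cons, if_neg hu, ih, List.filter_cons]
      simp
    · by_cases hu : c ∈ upperList
      · simp only [List.foldl_cons, if_pos hu, ih, List.filter_cons, hc]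
        have : subUpper c = [' ', c] := by
          simp [subUpper, (mem_upperList_iff c).mp hu]
        simp [this, hc]
        rw [String.append_assoc, ← String.ofList_append]
        simp
      · simp only [List.foldl_cons, if_neg hu, ih, List.filter_cons, hc]
        have hr : ¬ (65 ≤ c.toNat ∧ c.toNat ≤ 90) := fun h => hu ((mem_upperList_iff c).mpr h)
        have : subUpper c = [c] := by simp [subUpper, hr]
        simp [this, hc]
        rw [String.append_assoc, ← String.ofList_append]
        simp

-- ===== VERDICT (by name: the statement is the Claim_ definition above) =====
theorem humaniser_spec : Claim_equal_humaniser := by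
  intro inp _
  unfold Spec_humaniser humaniser humaniser_alt
  rw [foldl_emit]
  simp
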